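-- pv_equiv track=rewrite | github.com/ANlife764/AdaptQuiz | src/save_models.py | calculate_streak_past
-- ===== SOURCE A (Python) =====
-- def calculate_streak_past(group):
--     streak = 0
--     streaks = [0]
--     for correct in group[:-1]:
--         if correct == 1:
--             streak += 1
--         else:
--             streak = 0
--         streaks.append(streak)
--     return streaks
-- ===== SOURCE B (Python) =====
-- def calculate_streak_past(group):
--     # Run-by-run: walk maximal runs of ones / non-ones instead of a per-element counter.
--     xs = group[:-1]
--     res = [0]
--     while xs:
--         k = 0
--         if xs[0] == 1:
--             while k < len(xs) and xs[k] == 1: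
--                 k += 1
--             res.extend(range(1, k + 1))
--         else:
--             while k < len(xs) and xs[k] != 1:
--                 k += 1
--             res.extend([0] * k)
--         xs = xs[k:]
--     return res
-- ===== Notes on version B (the rewrite author's own statement) =====
-- stated objective: alternative
-- what changed: Replaces the per-element running-counter loop with a run-by-run traversal: each maximal run of ones emits the counts 1..k and each maximal run of non-ones emits zeros, appended after a leading 0.
import Mathlib
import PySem

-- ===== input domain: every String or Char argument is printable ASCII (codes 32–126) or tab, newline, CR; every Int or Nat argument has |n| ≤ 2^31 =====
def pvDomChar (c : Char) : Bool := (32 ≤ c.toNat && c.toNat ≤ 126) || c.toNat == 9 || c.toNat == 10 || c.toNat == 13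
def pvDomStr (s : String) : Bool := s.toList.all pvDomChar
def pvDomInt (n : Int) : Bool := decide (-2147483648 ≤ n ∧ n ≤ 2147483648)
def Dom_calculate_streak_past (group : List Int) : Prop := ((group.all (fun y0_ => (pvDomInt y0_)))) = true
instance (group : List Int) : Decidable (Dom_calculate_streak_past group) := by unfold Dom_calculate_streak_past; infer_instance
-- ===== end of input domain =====

-- B walks group[:-1] run by run (maximal runs of ones / non-ones) instead of A's per-element running counter; same cost, different decomposition.

-- ===== PORT A =====
-- group[:-1] on a list is exactly List.dropLast; the loop is a fold carrying (streak, streaks).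
def calculate_streak_past (group : List Int) : List Int :=
  (group.dropLast.foldl
    (fun (st : Int × List Int) correct =>
      let streak := if correct == 1 then st.1 + 1 else (0 : Int)
      (streak, st.2 ++ [streak]))
    ((0 : Int), [(0 : Int)])).2

-- ===== PORT B =====
-- the while loop of Source B: consume one maximal run per step (k = run length, xs := xs[k:])
def pvRuns (xs : List Int) : List Int :=
  match xs with
  | [] => []
  | x :: rest =>
    if x == 1 then
      let k := ((x :: rest).takeWhile (fun y => y == 1)).length
      (List.map (fun (i : Nat) => ((i : Int) + 1)) (List.range k)) ++ pvRuns ((x :: rest).drop k)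
    else
      let k := ((x :: rest).takeWhile (fun y => y != 1)).length
      List.replicate k (0 : Int) ++ pvRuns ((x :: rest).drop k)
termination_by xs.length
decreasing_by
  all_goals simp_all

def calculate_streak_past_alt (group : List Int) : List Int :=
  (0 : Int) :: pvRuns group.dropLast

-- ===== PRECONDITION & SPEC =====
def Spec_calculate_streak_past (group : List Int) (out : List Int) : Prop := out = calculate_streak_past_alt group
instance (group : List Int) (out : List Int) : Decidable (Spec_calculate_streak_past group out) := by unfold Spec_calculate_streak_past; infer_instance

-- ===== CLAIM (what is proved, stated in full; the proofs are below) =====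
def Claim_equal_calculate_streak_past : Prop := ∀ (group : List Int), Dom_calculate_streak_past group → Spec_calculate_streak_past group (calculate_streak_past group)

-- ===== LEMMAS AND PROOFS =====

-- the stream of streak values A's loop appends, starting from streak s
def pvStream (s : Int) : List Int → List Int
  | [] => []
  | x :: xs =>
    let s' := if x == 1 then s + 1 else 0
    s' :: pvStream s' xs

theorem pvFoldA (xs : List Int) : ∀ (s : Int) (acc : List Int),
    (xs.foldl
      (fun (st : Int × List Int) correct =>
        let streak := if correct == 1 then st.1 + 1 else (0 : Int)
        (streak, st.2 ++ [streak]))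
      (s, acc)).2 = acc ++ pvStream s xs := by
  induction xs with
  | nil => intro s acc; simp [pvStream]
  | cons x xs ih =>
    intro s acc
    simp only [List.foldl_cons, pvStream]
    rw [ih]
    simp

theorem pvStream_head_ne (s t : Int) (rest : List Int)
    (h : ∀ y, rest.head? = some y → y ≠ 1) :
    pvStream s rest = pvStream t rest := by
  cases rest with
  | nil => rfl
  | cons y ys =>
    have hy : y ≠ 1 := h y rfl
    simp [pvStream, hy]

theorem pvStream_ones (k : Nat) : ∀ (s : Int) (rest : List Int),
    (∀ y, rest.head? = some y → y ≠ 1) →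
    pvStream s (List.replicate k 1 ++ rest)
      = (List.range k).map (fun i : Nat => s + i + 1) ++ pvStream 0 rest := by
  induction k with
  | zero =>
    intro s rest h
    simpa using pvStream_head_ne s 0 rest h
  | succ k ih =>
    intro s rest h
    rw [List.replicate_succ]
    simp only [List.cons_append, pvStream]
    have h11 : ((1 : Int) == 1) = true := rfl
    simp only [h11, if_true]
    rw [ih (s + 1) rest h, List.range_succ_eq_map]
    simp only [List.map_cons, List.map_map, List.cons_append]
    congr 2
    · push_cast; ring
    · apply List.map_congr_left
      intro i _
      simp only [Function.comp]
      push_cast; ring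

theorem pvStream_zeros (pref : List Int) : ∀ (rest : List Int),
    (∀ y ∈ pref, y ≠ 1) →
    pvStream 0 (pref ++ rest)
      = List.replicate pref.length (0 : Int) ++ pvStream 0 rest := by
  induction pref with
  | nil => intro rest _; rfl
  | cons x xs ih =>
    intro rest h
    have hx : (x == 1) = false := by simpa using h x (by simp)
    simp only [List.cons_append, pvStream, hx, Bool.false_eq_true, if_false]
    rw [ih rest (fun y hy => h y (by simp [hy]))]
    simp [List.replicate_succ]

theorem pvDropLenTakeWhile {A : Type} (p : A → Bool) (l : List A) :
    l.drop (l.takeWhile p).length = l.dropWhile p := by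
  induction l with
  | nil => rfl
  | cons x xs ih =>
    by_cases h : p x <;> simp [h, ih]

theorem pvRuns_eq_stream (xs : List Int) : pvRuns xs = pvStream 0 xs := by
  fun_induction pvRuns xs with
  | case1 => rfl
  | case2 x rest hx k ih =>
    have hk : k = ((x :: rest).takeWhile (fun y => y == 1)).length := rfl
    have htw : ((x :: rest).takeWhile (fun y => y == 1)) =
        List.replicate ((x :: rest).takeWhile (fun y => y == 1)).length (1 : Int) := by
      rw [List.eq_replicate_iff]
      exact ⟨rfl, fun y hy => by simpa using List.mem_takeWhile_imp hy⟩
    have hsplit : (x :: rest) =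
        List.replicate ((x :: rest).takeWhile (fun y => y == 1)).length (1 : Int)
          ++ (x :: rest).dropWhile (fun y => y == 1) := by
      conv_lhs => rw [← List.takeWhile_append_dropWhile (p := fun y => y == 1) (l := x :: rest)]
      rw [← htw]
    have hdrop : (x :: rest).drop ((x :: rest).takeWhile (fun y => y == 1)).length
        = (x :: rest).dropWhile (fun y => y == 1) := pvDropLenTakeWhile _ _
    rw [hk, hdrop] at ih
    rw [hk, hdrop]
    conv_rhs => rw [hsplit]
    rw [pvStream_ones _ 0 _ (by
      intro y hy
      have := List.head?_dropWhile_not (p := fun y => (y : Int) == 1) (l := x :: rest)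
      rw [hy] at this
      simpa using this), ih]
    congr 1
    apply List.map_congr_left
    intro i _
    omega
  | case3 x rest hx k ih =>
    have hk : k = ((x :: rest).takeWhile (fun y => y != 1)).length := rfl
    have htw : ∀ y ∈ (x :: rest).takeWhile (fun y => y != 1), y ≠ (1 : Int) := by
      intro y hy
      simpa using List.mem_takeWhile_imp hy
    have hsplit : (x :: rest) =
        (x :: rest).takeWhile (fun y => y != 1) ++ (x :: rest).dropWhile (fun y => y != 1) := by
      rw [List.takeWhile_append_dropWhile]
    have hdrop : (x :: rest).drop ((x :: rest).takeWhile (fun y => y != 1)).length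
        = (x :: rest).dropWhile (fun y => y != 1) := pvDropLenTakeWhile _ _
    rw [hk, hdrop] at ih
    rw [hk, hdrop]
    conv_rhs => rw [hsplit]
    rw [pvStream_zeros _ _ htw, ih]

-- ===== VERDICT (by name: the statement is the Claim_ definition above) =====
theorem calculate_streak_past_spec : Claim_equal_calculate_streak_past := by
  intro group _
  unfold Spec_calculate_streak_past calculate_streak_past calculate_streak_past_alt
  rw [pvFoldA, pvRuns_eq_stream]
  simp
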